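-- pv_equiv track=rewrite | github.com/Sumedha494/DSA-Questions | rearrange_array_elements_by_sign.py | rearrange_alternating_ordered
-- ===== SOURCE A (Python) =====
-- def rearrange_alternating_ordered(arr):
--     """
--     Alternating positive and negative while maintaining relative order
--     Time: O(n), Space: O(n)
--     """
--     positives = [x for x in arr if x > 0]
--     negatives = [x for x in arr if x < 0]
--
--     result = []
--     pos_idx = 0
--     neg_idx = 0
--     n = len(arr)
--
--     # Place alternately
--     for i in range(n):
--         if i % 2 == 0:  # Even - positive
--             if pos_idx < len(positives):
--                 result.append(positives[pos_idx])
--                 pos_idx += 1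
--         else:  # Odd - negative
--             if neg_idx < len(negatives):
--                 result.append(negatives[neg_idx])
--                 neg_idx += 1
--
--     # Append remaining elements
--     while pos_idx < len(positives):
--         result.append(positives[pos_idx])
--         pos_idx += 1
--
--     while neg_idx < len(negatives):
--         result.append(negatives[neg_idx])
--         neg_idx += 1
--
--     return result
-- ===== SOURCE B (Python) =====
-- def rearrange_alternating_ordered(arr):
--     """Single pass with direct index placement: count positives/negatives, then
--     scatter-write each element into its final slot of a preallocated output."""
--     np_ = sum(1 for x in arr if x > 0)
--     nn = sum(1 for x in arr if x < 0)
--     m = min(np_, nn)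
--     out = [0] * (np_ + nn)
--     pc = nc = 0
--     for x in arr:
--         if x > 0:
--             out[2 * pc if pc < m else m + pc] = x
--             pc += 1
--         elif x < 0:
--             out[2 * nc + 1 if nc < m else np_ + nc] = x
--             nc += 1
--     return out
-- ===== Notes on version B (the rewrite author's own statement) =====
-- stated objective: alternative
-- what changed: Replaces A's split-into-sublists plus parity-indexed interleave loop and trailing while-loops by a single scatter pass: count positives/negatives, preallocate the output, and write each element of the original array directly into its closed-form final index.
import Mathlib
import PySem

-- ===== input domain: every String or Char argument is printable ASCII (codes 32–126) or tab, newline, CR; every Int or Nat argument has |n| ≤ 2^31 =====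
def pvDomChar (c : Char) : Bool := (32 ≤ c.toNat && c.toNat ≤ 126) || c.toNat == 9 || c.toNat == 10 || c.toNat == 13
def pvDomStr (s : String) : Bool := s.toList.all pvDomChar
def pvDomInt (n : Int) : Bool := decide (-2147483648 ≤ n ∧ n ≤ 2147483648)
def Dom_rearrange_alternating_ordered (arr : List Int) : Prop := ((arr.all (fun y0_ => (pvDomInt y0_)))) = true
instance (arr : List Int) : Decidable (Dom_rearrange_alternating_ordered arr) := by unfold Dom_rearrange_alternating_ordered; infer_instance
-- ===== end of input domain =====

-- B replaces A's sublist-building plus parity-indexed interleave loop (with trailing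
-- while-loops) by one scatter pass over the original array that writes each element
-- straight into its closed-form final index of a preallocated output; objective: alternative.

-- ===== PORT A =====
-- A-side helper: body of A's `for i in range(n)` loop (one literal step)
def pvStepA (positives negatives : List Int) (st : List Int × Nat × Nat) (i : Nat) :
    List Int × Nat × Nat :=
  if i % 2 = 0 then
    if st.2.1 < positives.length then
      (st.1 ++ [positives.getD st.2.1 0], st.2.1 + 1, st.2.2)
    else st
  else
    if st.2.2 < negatives.length then
      (st.1 ++ [negatives.getD st.2.2 0], st.2.1, st.2.2 + 1)
    else st

-- A-side helper: literal port of A's trailing `while idx < len(xs): result.append(xs[idx]); idx += 1`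
def pvWhilePush (xs : List Int) (idx : Nat) (acc : List Int) : List Int :=
  if idx < xs.length then pvWhilePush xs (idx + 1) (acc ++ [xs.getD idx 0]) else acc
termination_by xs.length - idx

def rearrange_alternating_ordered (arr : List Int) : List Int :=
  let positives := arr.filter (fun x => decide (0 < x))
  let negatives := arr.filter (fun x => decide (x < 0))
  let st := (List.range arr.length).foldl (pvStepA positives negatives) ([], 0, 0)
  pvWhilePush negatives st.2.2 (pvWhilePush positives st.2.1 st.1)

-- ===== PORT B =====
-- B-side helper: body of B's `for x in arr` loop; state = (out, pc, nc);
-- Python's in-range `out[idx] = x` is List.set (idx is proved in range in the lemmas)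
def pvStepB (m np : Nat) (st : List Int × Nat × Nat) (x : Int) : List Int × Nat × Nat :=
  if 0 < x then
    (st.1.set (if st.2.1 < m then 2 * st.2.1 else m + st.2.1) x, st.2.1 + 1, st.2.2)
  else if x < 0 then
    (st.1.set (if st.2.2 < m then 2 * st.2.2 + 1 else np + st.2.2) x, st.2.1, st.2.2 + 1)
  else st

def rearrange_alternating_ordered_alt (arr : List Int) : List Int :=
  let np := arr.countP (fun x => decide (0 < x))
  let nn := arr.countP (fun x => decide (x < 0))
  let m := min np nn
  let st := arr.foldl (pvStepB m np) (List.replicate (np + nn) 0, 0, 0)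
  st.1

-- ===== PRECONDITION & SPEC =====
def Spec_rearrange_alternating_ordered (arr : List Int) (out : List Int) : Prop := out = rearrange_alternating_ordered_alt arr
instance (arr : List Int) (out : List Int) : Decidable (Spec_rearrange_alternating_ordered arr out) := by unfold Spec_rearrange_alternating_ordered; infer_instance

-- ===== CLAIM (what is proved, stated in full; the proofs are below) =====
def Claim_equal_rearrange_alternating_ordered : Prop := ∀ (arr : List Int), Dom_rearrange_alternating_ordered arr → Spec_rearrange_alternating_ordered arr (rearrange_alternating_ordered arr)

-- ===== LEMMAS AND PROOFS =====

-- common spec: alternate one-from-each, then the leftover tail of the longer list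
def pvInter : List Int → List Int → List Int
  | [], b => b
  | a, [] => a
  | p :: a, q :: b => p :: q :: pvInter a b

theorem pvInter_nil_right (a : List Int) : pvInter a [] = a := by
  cases a <;> rfl

theorem pvInter_length : ∀ (a b : List Int), (pvInter a b).length = a.length + b.length := by
  intro a
  induction a with
  | nil => intro b; simp [pvInter]
  | cons p a ih =>
    intro b
    cases b with
    | nil => simp [pvInter_nil_right]
    | cons q b => simp [pvInter, ih b]; omega

-- pointwise value of pvInter a b with progress counters pc, nc (unwritten slots are 0)
def pvValAt (P Q : List Int) (pc nc i : Nat) : Int :=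
  if i < 2 * min P.length Q.length then
    (if i % 2 = 0 then (if i / 2 < pc then P.getD (i / 2) 0 else 0)
     else (if i / 2 < nc then Q.getD (i / 2) 0 else 0))
  else if min P.length Q.length < P.length then
    (if i - min P.length Q.length < pc then P.getD (i - min P.length Q.length) 0 else 0)
  else
    (if i - P.length < nc then Q.getD (i - P.length) 0 else 0)

theorem pvInter_getD : ∀ (a b : List Int) (i : Nat), i < a.length + b.length →
    (pvInter a b).getD i 0 = pvValAt a b a.length b.length i := by
  intro a
  induction a with
  | nil =>
    intro b i hi
    simp only [List.length_nil, Nat.zero_add] at hi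
    simp [pvInter, pvValAt, hi]
  | cons p a ih =>
    intro b i hi
    cases b with
    | nil =>
      simp only [pvInter_nil_right, pvValAt]
      simp only [List.length_nil, Nat.add_zero] at hi
      have h0 : min (p :: a).length ([] : List Int).length = 0 := by simp
      rw [h0]
      simp only [List.length_cons] at hi
      simp
      intro h
      omega
    | cons q b =>
      match i with
      | 0 =>
        simp [pvInter, pvValAt, Nat.succ_min_succ]
      | 1 =>
        simp [pvInter, pvValAt, Nat.succ_min_succ]
        omega
      | (i + 2) =>
        have hi' : i < a.length + b.length := by
          simp only [List.length_cons] at hi; omega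
        have h := ih b i hi'
        have hstep : (pvInter (p :: a) (q :: b)).getD (i + 2) 0 = (pvInter a b).getD i 0 := by
          simp [pvInter, List.getD]
        rw [hstep, h]
        simp only [pvValAt, List.length_cons, Nat.succ_min_succ]
        have hmod : (i + 2) % 2 = i % 2 := by omega
        have hdiv : (i + 2) / 2 = i / 2 + 1 := by omega
        set m := min a.length b.length with hm
        by_cases h1 : i < 2 * m
        · have h2 : i + 2 < 2 * (m + 1) := by omega
          rw [if_pos h1, if_pos h2, hmod, hdiv]
          by_cases he : i % 2 = 0
          · simp [he, Nat.add_lt_add_iff_right]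
          · simp [he, Nat.add_lt_add_iff_right]
        · have h2 : ¬ (i + 2 < 2 * (m + 1)) := by omega
          rw [if_neg h1, if_neg h2]
          by_cases h3 : m < a.length
          · have h4 : m + 1 < a.length + 1 := by omega
            rw [if_pos h3, if_pos h4]
            have : i + 2 - (m + 1) = (i - m) + 1 := by omega
            rw [this]
            simp [Nat.add_lt_add_iff_right]
          · have h4 : ¬ (m + 1 < a.length + 1) := by omega
            rw [if_neg h3, if_neg h4]
            have : i + 2 - (a.length + 1) = (i - a.length) + 1 := by omega
            rw [this]
            simp [Nat.add_lt_add_iff_right]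

theorem pvGetD_set (l : List Int) (j i : Nat) (x : Int) (hi : i < l.length) :
    (l.set j x).getD i 0 = if j = i then x else l.getD i 0 := by
  have hl : i < (l.set j x).length := by simpa using hi
  rw [List.getD_eq_getElem _ _ hl, List.getElem_set, List.getD_eq_getElem _ _ hi]

-- the loop invariant of B's scatter pass
theorem pvLoopB (P Q : List Int) :
    ∀ (l out : List Int) (pc nc : Nat),
      P.drop pc = l.filter (fun x => decide (0 < x)) →
      Q.drop nc = l.filter (fun x => decide (x < 0)) →
      pc ≤ P.length → nc ≤ Q.length →
      out.length = P.length + Q.length →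
      (∀ i, i < P.length + Q.length → out.getD i 0 = pvValAt P Q pc nc i) →
      ((l.foldl (pvStepB (min P.length Q.length) P.length) (out, pc, nc)).1.length
          = P.length + Q.length ∧
       ∀ i, i < P.length + Q.length →
         (l.foldl (pvStepB (min P.length Q.length) P.length) (out, pc, nc)).1.getD i 0
           = pvValAt P Q P.length Q.length i) := by
  intro l
  induction l with
  | nil =>
    intro out pc nc hp hq hpc hnc hlen hinv
    simp only [List.filter_nil] at hp hq
    have h1 : pc = P.length := by
      have := List.drop_eq_nil_iff.mp hp; omega
    have h2 : nc = Q.length := by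
      have := List.drop_eq_nil_iff.mp hq; omega
    subst h1; subst h2
    exact ⟨hlen, by simpa using hinv⟩
  | cons x l ih =>
    intro out pc nc hp hq hpc hnc hlen hinv
    set m := min P.length Q.length with hm
    by_cases h1 : 0 < x
    · have hfp : (x :: l).filter (fun x => decide (0 < x)) =
          x :: l.filter (fun x => decide (0 < x)) := by simp [h1]
      have hfq : (x :: l).filter (fun x => decide (x < 0)) =
          l.filter (fun x => decide (x < 0)) := by
        simp [List.filter_cons, show ¬ x < 0 by omega]
      rw [hfp] at hp
      rw [hfq] at hq
      have hpclt : pc < P.length := by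
        by_contra h
        rw [List.drop_eq_nil_of_le (by omega)] at hp
        exact List.cons_ne_nil _ _ hp.symm
      have hx : P.getD pc 0 = x := by
        have : P[pc]? = (P.drop pc)[0]? := by
          rw [List.getElem?_drop, Nat.add_zero]
        rw [hp] at this
        simp only [List.getElem?_cons_zero] at this
        simp [List.getD, this]
      have hdrop : P.drop (pc + 1) = l.filter (fun x => decide (0 < x)) := by
        rw [← List.drop_drop, hp, List.drop_one, List.tail_cons]
      -- the written index
      set j := (if pc < m then 2 * pc else m + pc) with hj
      have hjlt : j < P.length + Q.length := by
        rw [hj]; split_ifs with h <;> omega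
      have hstep : pvStepB m P.length (out, pc, nc) x = (out.set j x, pc + 1, nc) := by
        simp [pvStepB, h1, hj]
      have hinv' : ∀ i, i < P.length + Q.length →
          (out.set j x).getD i 0 = pvValAt P Q (pc + 1) nc i := by
        intro i hi
        rw [pvGetD_set out j i x (by omega)]
        by_cases hij : j = i
        · subst hij
          rw [if_pos rfl]
          simp only [pvValAt, ← hm]
          rw [hj]
          by_cases hc : pc < m
          · rw [if_pos hc, if_pos (by omega), if_pos (by omega : 2 * pc % 2 = 0),
              if_pos (by omega : 2 * pc / 2 < pc + 1),
              (by omega : 2 * pc / 2 = pc), hx]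
          · rw [if_neg hc, if_neg (by omega : ¬ (m + pc < 2 * m)),
              if_pos (by omega : m < P.length),
              if_pos (by omega : m + pc - m < pc + 1),
              (by omega : m + pc - m = pc), hx]
        · rw [if_neg hij, hinv i hi]
          have key : pvValAt P Q (pc + 1) nc i = pvValAt P Q pc nc i := by
            simp only [pvValAt, ← hm]
            have hji : (if pc < m then 2 * pc else m + pc) ≠ i := hj ▸ hij
            by_cases hcm : pc < m
            · rw [if_pos hcm] at hji
              split_ifs <;> first | rfl | omega
            · rw [if_neg hcm] at hji
              split_ifs <;> first | rfl | omega
          exact key.symm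
      have := ih (out.set j x) (pc + 1) nc hdrop hq (by omega) hnc
        (by simpa using hlen) hinv'
      simpa [List.foldl_cons, hstep] using this
    · by_cases h2 : x < 0
      · have hfp : (x :: l).filter (fun x => decide (0 < x)) =
            l.filter (fun x => decide (0 < x)) := by
          simp [List.filter_cons, h1]
        have hfq : (x :: l).filter (fun x => decide (x < 0)) =
            x :: l.filter (fun x => decide (x < 0)) := by simp [h2]
        rw [hfp] at hp
        rw [hfq] at hq
        have hnclt : nc < Q.length := by
          by_contra h
          rw [List.drop_eq_nil_of_le (by omega)] at hq
          exact List.cons_ne_nil _ _ hq.symm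
        have hx : Q.getD nc 0 = x := by
          have : Q[nc]? = (Q.drop nc)[0]? := by
            rw [List.getElem?_drop, Nat.add_zero]
          rw [hq] at this
          simp only [List.getElem?_cons_zero] at this
          simp [List.getD, this]
        have hdrop : Q.drop (nc + 1) = l.filter (fun x => decide (x < 0)) := by
          rw [← List.drop_drop, hq, List.drop_one, List.tail_cons]
        set j := (if nc < m then 2 * nc + 1 else P.length + nc) with hj
        have hstep : pvStepB m P.length (out, pc, nc) x = (out.set j x, pc, nc + 1) := by
          simp [pvStepB, h1, h2, hj]
        have hinv' : ∀ i, i < P.length + Q.length →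
            (out.set j x).getD i 0 = pvValAt P Q pc (nc + 1) i := by
          intro i hi
          rw [pvGetD_set out j i x (by omega)]
          by_cases hij : j = i
          · subst hij
            rw [if_pos rfl]
            simp only [pvValAt, ← hm]
            rw [hj]
            by_cases hc : nc < m
            · rw [if_pos hc, if_pos (by omega),
                if_neg (by omega : ¬ (2 * nc + 1) % 2 = 0),
                if_pos (by omega : (2 * nc + 1) / 2 < nc + 1),
                (by omega : (2 * nc + 1) / 2 = nc), hx]
            · -- nc ≥ m and nc < Q.length force m = P.length
              have hmp : m = P.length := by omega
              rw [if_neg hc, if_neg (by omega : ¬ (P.length + nc < 2 * m)),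
                if_neg (by omega : ¬ m < P.length),
                if_pos (by omega : P.length + nc - P.length < nc + 1),
                (by omega : P.length + nc - P.length = nc), hx]
          · rw [if_neg hij, hinv i hi]
            have key : pvValAt P Q pc (nc + 1) i = pvValAt P Q pc nc i := by
              simp only [pvValAt, ← hm]
              have hji : (if nc < m then 2 * nc + 1 else P.length + nc) ≠ i := hj ▸ hij
              by_cases hcm : nc < m
              · rw [if_pos hcm] at hji
                split_ifs <;> first | rfl | omega
              · rw [if_neg hcm] at hji
                split_ifs <;> first | rfl | omega
            exact key.symm
        have := ih (out.set j x) pc (nc + 1) hp hdrop hpc (by omega)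
          (by simpa using hlen) hinv'
        simpa [List.foldl_cons, hstep] using this
      · have hx0 : x = 0 := by omega
        have hfp : (x :: l).filter (fun x => decide (0 < x)) =
            l.filter (fun x => decide (0 < x)) := by simp [List.filter_cons, h1]
        have hfq : (x :: l).filter (fun x => decide (x < 0)) =
            l.filter (fun x => decide (x < 0)) := by simp [List.filter_cons, h2]
        rw [hfp] at hp
        rw [hfq] at hq
        have hstep : pvStepB m P.length (out, pc, nc) x = (out, pc, nc) := by
          simp [pvStepB, h1, h2]
        have := ih out pc nc hp hq hpc hnc hlen hinv
        simpa [List.foldl_cons, hstep] using this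

theorem pvB_eq_inter (arr : List Int) :
    rearrange_alternating_ordered_alt arr
      = pvInter (arr.filter (fun x => decide (0 < x))) (arr.filter (fun x => decide (x < 0))) := by
  set P := arr.filter (fun x => decide (0 < x)) with hP
  set Q := arr.filter (fun x => decide (x < 0)) with hQ
  have hcp : arr.countP (fun x => decide (0 < x)) = P.length := List.countP_eq_length_filter
  have hcq : arr.countP (fun x => decide (x < 0)) = Q.length := List.countP_eq_length_filter
  have hinit : ∀ i, i < P.length + Q.length →
      (List.replicate (P.length + Q.length) (0 : Int)).getD i 0 = pvValAt P Q 0 0 i := by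
    intro i hi
    rw [List.getD_eq_getElem _ _ (by simpa using hi), List.getElem_replicate]
    simp only [pvValAt]
    split_ifs <;> first | rfl | omega
  have h := pvLoopB P Q arr (List.replicate (P.length + Q.length) 0) 0 0
    (by simp [hP]) (by simp [hQ]) (by omega) (by omega) (by simp) hinit
  apply List.ext_getElem
  · rw [show rearrange_alternating_ordered_alt arr =
        (arr.foldl (pvStepB (min P.length Q.length) P.length)
          (List.replicate (P.length + Q.length) 0, 0, 0)).1 by
      simp only [rearrange_alternating_ordered_alt, hcp, hcq]]
    rw [h.1, pvInter_length]
  · intro i h1 h2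
    have hi : i < P.length + Q.length := by
      rw [pvInter_length] at h2; exact h2
    have hB : rearrange_alternating_ordered_alt arr =
        (arr.foldl (pvStepB (min P.length Q.length) P.length)
          (List.replicate (P.length + Q.length) 0, 0, 0)).1 := by
      simp only [rearrange_alternating_ordered_alt, hcp, hcq]
    rw [← List.getD_eq_getElem _ 0 h1, ← List.getD_eq_getElem _ 0 h2, hB,
      h.2 i hi, pvInter_getD P Q i hi]

-- ===== A-side lemmas (A also equals pvInter P Q) =====

theorem pvWhilePush_eq (xs : List Int) (idx : Nat) (acc : List Int) :
    pvWhilePush xs idx acc = acc ++ xs.drop idx := by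
  induction idx, acc using pvWhilePush.induct (xs := xs) with
  | case1 idx acc h ih =>
    rw [pvWhilePush, if_pos h, ih, List.getD_eq_getElem xs 0 h,
      List.drop_eq_getElem_cons h]
    simp
  | case2 idx acc h =>
    rw [pvWhilePush, if_neg h, List.drop_eq_nil_of_le (by omega)]
    simp

theorem pvInter_snoc_left (e : Int) : ∀ (a b : List Int), b.length ≤ a.length →
    pvInter (a ++ [e]) b = pvInter a b ++ [e] := by
  intro a
  induction a with
  | nil =>
    intro b hb
    cases b with
    | nil => rfl
    | cons q b => simp at hb
  | cons p a ih =>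
    intro b hb
    cases b with
    | nil => simp [pvInter_nil_right]
    | cons q b =>
      simp only [List.cons_append, pvInter, List.length_cons] at *
      rw [ih b (by omega)]

theorem pvInter_snoc_right (e : Int) : ∀ (a b : List Int), a.length ≤ b.length + 1 →
    pvInter a (b ++ [e]) = pvInter a b ++ [e] := by
  intro a
  induction a with
  | nil => intro b _; simp [pvInter]
  | cons p a ih =>
    intro b hb
    cases b with
    | nil =>
      simp only [List.length_cons, List.length_nil] at hb
      have : a = [] := List.eq_nil_of_length_eq_zero (by omega)
      subst this; rfl
    | cons q b =>
      simp only [List.cons_append, pvInter, List.length_cons] at *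
      rw [ih b (by omega)]

theorem pvInter_take_left : ∀ (b a : List Int) (k : Nat), b.length ≤ k →
    pvInter (a.take k) b ++ a.drop k = pvInter a b := by
  intro b
  induction b with
  | nil => intro a k _; simp [pvInter_nil_right]
  | cons q b ih =>
    intro a k hk
    cases a with
    | nil => simp [pvInter]
    | cons p a =>
      cases k with
      | zero => simp at hk
      | succ k =>
        simp only [List.take_succ_cons, List.drop_succ_cons, pvInter, List.length_cons] at *
        rw [List.cons_append, List.cons_append, ih a k (by omega)]

theorem pvInter_take_right : ∀ (a b : List Int) (k : Nat), a.length ≤ k →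
    pvInter a (b.take k) ++ b.drop k = pvInter a b := by
  intro a
  induction a with
  | nil => intro b k _; simp [pvInter]
  | cons p a ih =>
    intro b k hk
    cases b with
    | nil => simp [pvInter_nil_right]
    | cons q b =>
      cases k with
      | zero => simp at hk
      | succ k =>
        simp only [List.take_succ_cons, List.drop_succ_cons, pvInter, List.length_cons] at *
        rw [List.cons_append, List.cons_append, ih b k (by omega)]

theorem pvFilterDisjoint (l : List Int) :
    (l.filter (fun x => decide (0 < x))).length + (l.filter (fun x => decide (x < 0))).length
      ≤ l.length := by
  induction l with
  | nil => simp
  | cons x l ih =>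
    by_cases h1 : 0 < x <;> by_cases h2 : x < 0 <;>
      simp [h1, h2] <;> omega

theorem pvLoopA (P Q : List Int) : ∀ (k : Nat),
    (List.range k).foldl (pvStepA P Q) ([], 0, 0)
      = (pvInter (P.take (min ((k + 1) / 2) P.length)) (Q.take (min (k / 2) Q.length)),
         min ((k + 1) / 2) P.length, min (k / 2) Q.length) := by
  intro k
  induction k with
  | zero => simp [pvInter]
  | succ k ih =>
    rw [List.range_succ, List.foldl_append, List.foldl_cons, List.foldl_nil, ih]
    by_cases hk : k % 2 = 0
    · by_cases hp : k / 2 < P.length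
      · have hmin : min ((k + 1) / 2) P.length = k / 2 := by omega
        have ha : min ((k + 1 + 1) / 2) P.length = k / 2 + 1 := by omega
        have hb : min ((k + 1) / 2) Q.length = min (k / 2) Q.length := by omega
        have htake : P.take (k / 2 + 1) = P.take (k / 2) ++ [P[k / 2]] := by
          rw [List.take_add_one, List.getElem?_eq_getElem hp]; rfl
        simp only [pvStepA, hk, hmin, ha, hb, htake, List.getD_eq_getElem P 0 hp]
        rw [if_pos trivial, if_pos hp,
          pvInter_snoc_left _ _ _ (by simp only [List.length_take]; omega)]
      · have hmin : min ((k + 1) / 2) P.length = P.length := by omega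
        have ha : min ((k + 1 + 1) / 2) P.length = P.length := by omega
        have hb : min ((k + 1) / 2) Q.length = min (k / 2) Q.length := by omega
        simp only [pvStepA, hk, hmin, ha, hb]
        simp
    · by_cases hq : k / 2 < Q.length
      · have hmin : min (k / 2) Q.length = k / 2 := by omega
        have ha : min ((k + 1 + 1) / 2) P.length = min ((k + 1) / 2) P.length := by omega
        have hb : min ((k + 1) / 2) Q.length = k / 2 + 1 := by omega
        have htake : Q.take (k / 2 + 1) = Q.take (k / 2) ++ [Q[k / 2]] := by
          rw [List.take_add_one, List.getElem?_eq_getElem hq]; rfl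
        simp only [pvStepA, hmin, ha, hb, htake, List.getD_eq_getElem Q 0 hq]
        rw [if_neg hk, if_pos hq,
          pvInter_snoc_right _ _ _ (by simp only [List.length_take]; omega)]
      · have hmin : min (k / 2) Q.length = Q.length := by omega
        have ha : min ((k + 1 + 1) / 2) P.length = min ((k + 1) / 2) P.length := by omega
        have hb : min ((k + 1) / 2) Q.length = Q.length := by omega
        simp only [pvStepA, hmin, ha, hb]
        rw [if_neg hk]
        simp

theorem pvA_eq_inter (arr : List Int) :
    rearrange_alternating_ordered arr
      = pvInter (arr.filter (fun x => decide (0 < x))) (arr.filter (fun x => decide (x < 0))) := by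
  simp only [rearrange_alternating_ordered]
  set P := arr.filter (fun x => decide (0 < x)) with hP
  set Q := arr.filter (fun x => decide (x < 0)) with hQ
  have hlen : P.length + Q.length ≤ arr.length := pvFilterDisjoint arr
  set n := arr.length with hn
  rw [pvLoopA, pvWhilePush_eq, pvWhilePush_eq]
  set pi := min ((n + 1) / 2) P.length with hpi
  set ni := min (n / 2) Q.length with hni
  by_cases hp : (n + 1) / 2 < P.length
  · have h1 : ni = Q.length := by omega
    simp only [h1, List.take_length, List.drop_length, List.append_nil]
    exact pvInter_take_left Q P pi (by omega)
  · by_cases hq : n / 2 < Q.length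
    · have h1 : pi = P.length := by omega
      simp only [h1, List.take_length, List.drop_length, List.append_nil]
      exact pvInter_take_right P Q ni (by omega)
    · have h1 : pi = P.length := by omega
      have h2 : ni = Q.length := by omega
      simp [h1, h2]

-- ===== VERDICT (by name: the statement is the Claim_ definition above) =====
theorem rearrange_alternating_ordered_spec : Claim_equal_rearrange_alternating_ordered := by
  intro arr _
  unfold Spec_rearrange_alternating_ordered
  rw [pvA_eq_inter, pvB_eq_inter]
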